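-- pv_equiv track=rewrite | github.com/GiftItCode/match | gen_timeslots.py | gen_timeslots
-- ===== SOURCE A (Python) =====
-- def gen_timeslots(gran, start_hour, end_hour):
--     """
--     :param gran: granularity of timeslots in minutes.
--     :param start_hour: starting hour
--     :param end_hour: ending hour
--     """
--     slots = []
--     for day in range(1,8):
--         for slot in range(int(start_hour*60/gran),int(end_hour*60/gran)):
--             hb = int(slot*gran/60)
--             mb = int(slot*gran%60)
--             he = int((slot+1)*gran/60)
--             me = int((slot+1)*gran%60)
--             slots.append((f"'{hb:02}:{mb:02}'",f"'{he:02}:{me:02}'",day))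
--     return slots
-- ===== SOURCE B (Python) =====
-- def gen_timeslots(gran, start_hour, end_hour):
--     """
--     :param gran: granularity of timeslots in minutes.
--     :param start_hour: starting hour
--     :param end_hour: ending hour
--     """
--     lo = int(start_hour * 60 / gran)
--     hi = int(end_hour * 60 / gran)
--     n = hi - lo
--     if n <= 0:
--         return []
--
--     def fmt(s):
--         t = s * gran
--         return f"'{int(t / 60):02}:{int(t % 60):02}'"
--
--     return [(fmt(lo + k % n), fmt(lo + k % n + 1), k // n + 1)
--             for k in range(7 * n)]
-- ===== Notes on version B (the rewrite author's own statement) =====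
-- stated objective: alternative
-- what changed: B replaces A's nested day/slot loops by one flat loop over range(7*n) that recovers the day and the slot from the flat index by divmod arithmetic (day = k//n + 1, slot = lo + k%n), with an early [] return when the slot range is empty.
import Mathlib
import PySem

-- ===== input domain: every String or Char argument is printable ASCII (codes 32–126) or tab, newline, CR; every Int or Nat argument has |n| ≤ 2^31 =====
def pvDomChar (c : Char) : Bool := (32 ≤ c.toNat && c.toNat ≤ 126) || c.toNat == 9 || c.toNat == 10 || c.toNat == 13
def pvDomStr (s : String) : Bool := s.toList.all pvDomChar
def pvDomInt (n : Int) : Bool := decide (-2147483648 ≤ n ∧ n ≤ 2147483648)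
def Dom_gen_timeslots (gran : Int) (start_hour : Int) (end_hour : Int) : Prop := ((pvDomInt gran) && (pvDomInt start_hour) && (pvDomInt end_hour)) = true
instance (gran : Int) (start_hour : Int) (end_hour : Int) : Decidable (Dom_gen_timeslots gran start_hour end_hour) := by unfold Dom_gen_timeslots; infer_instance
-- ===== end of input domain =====

-- B replaces A's two nested loops by a single flat loop over range(7*n) that recovers
-- day and slot from the flat index by divmod — same tuples in the same order, no speed claim.

-- ===== PORT A =====
-- f"{n:02}": zero-pad to width 2; negatives already have width ≥ 2, so only 0..9 get a pad.
def pvFmt2 (n : Int) : String :=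
  if 0 ≤ n ∧ n < 10 then "0" ++ PySem.Int.toStr n else PySem.Int.toStr n

-- int(x/y): on Dom every numerator reached has |·| < 2^38 ≪ 2^53, so the float quotient
-- truncates to exactly the truncated integer quotient Int.tdiv (checked against CPython).
def gen_timeslots (gran : Int) (start_hour : Int) (end_hour : Int) : List (String × String × Int) :=
  (PySem.List.pyRange 1 8 1).foldl (fun slots day =>
    (PySem.List.pyRange ((start_hour * 60).tdiv gran) ((end_hour * 60).tdiv gran) 1).foldl
      (fun slots slot =>
        let hb := (slot * gran).tdiv 60
        let mb := PySem.Int.mod (slot * gran) 60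
        let he := ((slot + 1) * gran).tdiv 60
        let me := PySem.Int.mod ((slot + 1) * gran) 60
        slots ++ [("'" ++ pvFmt2 hb ++ ":" ++ pvFmt2 mb ++ "'",
                   "'" ++ pvFmt2 he ++ ":" ++ pvFmt2 me ++ "'", day)])
      slots) []

-- ===== PORT B =====
-- fmt(s) of Source B (same int(t/60)=tdiv reading as in A's port)
def pvSlotStr (gran : Int) (s : Int) : String :=
  let t := s * gran
  "'" ++ pvFmt2 (t.tdiv 60) ++ ":" ++ pvFmt2 (PySem.Int.mod t 60) ++ "'"

def gen_timeslots_alt (gran : Int) (start_hour : Int) (end_hour : Int) : List (String × String × Int) :=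
  let lo := (start_hour * 60).tdiv gran
  let hi := (end_hour * 60).tdiv gran
  let n := hi - lo
  if n ≤ 0 then []
  else
    (PySem.List.pyRange 0 (7 * n) 1).map (fun k =>
      (pvSlotStr gran (lo + PySem.Int.mod k n),
       pvSlotStr gran (lo + PySem.Int.mod k n + 1),
       PySem.Int.floordiv k n + 1))

-- ===== PRECONDITION & SPEC =====
-- Python raises ZeroDivisionError when gran = 0.
def Pre_gen_timeslots (gran : Int) (start_hour : Int) (end_hour : Int) : Prop := gran ≠ 0
instance (gran : Int) (start_hour : Int) (end_hour : Int) : Decidable (Pre_gen_timeslots gran start_hour end_hour) := by unfold Pre_gen_timeslots; infer_instance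
def pvWitness_gen_timeslots : Int × Int × Int := (30, 9, 10)

def Spec_gen_timeslots (gran : Int) (start_hour : Int) (end_hour : Int) (out : List (String × String × Int)) : Prop := out = gen_timeslots_alt gran start_hour end_hour
instance (gran : Int) (start_hour : Int) (end_hour : Int) (out : List (String × String × Int)) : Decidable (Spec_gen_timeslots gran start_hour end_hour out) := by unfold Spec_gen_timeslots; infer_instance

-- ===== CLAIM (what is proved, stated in full; the proofs are below) =====
def Claim_equal_gen_timeslots : Prop := ∀ (gran : Int) (start_hour : Int) (end_hour : Int), Dom_gen_timeslots gran start_hour end_hour → Pre_gen_timeslots gran start_hour end_hour → Spec_gen_timeslots gran start_hour end_hour (gen_timeslots gran start_hour end_hour)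

-- ===== LEMMAS AND PROOFS =====

-- one day-chunk of B's flat range equals A's per-day slot list (shifted to day d+1)
theorem pv_chunk (gran lo n a b d day : Int) (_hd : 0 ≤ d) (hn : 0 < n)
    (ha : a = d * n) (hb : b = a + n) (hday : day = d + 1) :
    (PySem.List.pyRange a b 1).map (fun k =>
      (pvSlotStr gran (lo + PySem.Int.mod k n),
       pvSlotStr gran (lo + PySem.Int.mod k n + 1),
       PySem.Int.floordiv k n + 1))
    = (PySem.List.pyRange lo (lo + n) 1).map (fun s => (pvSlotStr gran s, pvSlotStr gran (s + 1), day)) := by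
  subst hb; subst ha; subst hday
  apply List.ext_getElem
  · simp only [List.length_map, PySem.List.length_pyRange_one]; omega
  · intro i h1 h2
    simp only [List.length_map, PySem.List.length_pyRange_one] at h1
    have hi : (i : Int) < n := by omega
    simp only [List.getElem_map, PySem.List.getElem_pyRange_one]
    have hmod : PySem.Int.mod (d * n + i) n = i := by
      rw [PySem.Int.mod_eq_emod_of_pos hn,
          show d * n + (i : Int) = i + n * d from by ring,
          Int.add_mul_emod_self_left, Int.emod_eq_of_lt (by omega) hi]
    have hdiv : PySem.Int.floordiv (d * n + i) n = d := by
      rw [PySem.Int.floordiv_eq_ediv_of_pos hn,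
          show d * n + (i : Int) = i + n * d from by ring,
          Int.add_mul_ediv_left _ _ (by omega : n ≠ 0),
          Int.ediv_eq_zero_of_lt (by omega) hi, zero_add]
    rw [hmod, hdiv]

theorem gen_timeslots_eq_flatMap (gran sh eh : Int) :
    gen_timeslots gran sh eh =
      (PySem.List.pyRange 1 8 1).flatMap (fun day =>
        (PySem.List.pyRange ((sh * 60).tdiv gran) ((eh * 60).tdiv gran) 1).map (fun slot =>
          (pvSlotStr gran slot, pvSlotStr gran (slot + 1), day))) := by
  unfold gen_timeslots
  simp only [PySem.List.foldl_append_singleton_eq_map, PySem.List.foldl_append_eq_flatMap,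
    List.nil_append]
  rfl

-- ===== VERDICT (by name: the statement is the Claim_ definition above) =====
theorem gen_timeslots_spec : Claim_equal_gen_timeslots := by
  intro gran sh eh _ _
  unfold Spec_gen_timeslots
  rw [gen_timeslots_eq_flatMap]
  unfold gen_timeslots_alt
  set lo := (sh * 60).tdiv gran with hlo
  set hi := (eh * 60).tdiv gran with hhi
  by_cases h : hi - lo ≤ 0
  · simp only [h, if_true]
    rw [PySem.List.pyRange_one_eq_nil (by omega : hi ≤ lo)]
    simp
  · simp only [h, if_false]
    set n := hi - lo with hn
    have hpos : 0 < n := by omega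
    have hhilo : hi = lo + n := by omega
    have hsplit : PySem.List.pyRange 0 (7 * n) 1
        = PySem.List.pyRange 0 n 1 ++ PySem.List.pyRange n (2 * n) 1
          ++ PySem.List.pyRange (2 * n) (3 * n) 1 ++ PySem.List.pyRange (3 * n) (4 * n) 1
          ++ PySem.List.pyRange (4 * n) (5 * n) 1 ++ PySem.List.pyRange (5 * n) (6 * n) 1
          ++ PySem.List.pyRange (6 * n) (7 * n) 1 := by
      rw [PySem.List.pyRange_one_append 0 (6 * n) (7 * n) (by nlinarith) (by nlinarith),
          PySem.List.pyRange_one_append 0 (5 * n) (6 * n) (by nlinarith) (by nlinarith),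
          PySem.List.pyRange_one_append 0 (4 * n) (5 * n) (by nlinarith) (by nlinarith),
          PySem.List.pyRange_one_append 0 (3 * n) (4 * n) (by nlinarith) (by nlinarith),
          PySem.List.pyRange_one_append 0 (2 * n) (3 * n) (by nlinarith) (by nlinarith),
          PySem.List.pyRange_one_append 0 n (2 * n) (by nlinarith) (by nlinarith)]
    rw [hsplit]
    have hdays : PySem.List.pyRange 1 8 1 = [1, 2, 3, 4, 5, 6, 7] := by decide
    rw [hdays, hhilo]
    simp only [List.map_append, List.flatMap_cons, List.flatMap_nil, List.append_nil]
    rw [pv_chunk gran lo n 0 n 0 1 (by omega) hpos (by ring) (by ring) (by norm_num),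
        pv_chunk gran lo n n (2 * n) 1 2 (by omega) hpos (by ring) (by ring) (by norm_num),
        pv_chunk gran lo n (2 * n) (3 * n) 2 3 (by omega) hpos (by ring) (by ring) (by norm_num),
        pv_chunk gran lo n (3 * n) (4 * n) 3 4 (by omega) hpos (by ring) (by ring) (by norm_num),
        pv_chunk gran lo n (4 * n) (5 * n) 4 5 (by omega) hpos (by ring) (by ring) (by norm_num),
        pv_chunk gran lo n (5 * n) (6 * n) 5 6 (by omega) hpos (by ring) (by ring) (by norm_num),
        pv_chunk gran lo n (6 * n) (7 * n) 6 7 (by omega) hpos (by ring) (by ring) (by norm_num)]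
    simp [List.append_assoc]
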